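-- pv_equiv track=rewrite | github.com/edelveart/figuratenum | src/figuratenum/utils.py | helper_centered_hypertetrahedron
-- ===== SOURCE A (Python) =====
-- from math import comb as math_comb, factorial as math_factorial, prod as math_prod
--
-- def binomial_coefficient(n: int, k: int) -> int:
--     """Optimized version using math.comb for production."""
--     return math_comb(n, k)
--
-- def helper_centered_hypertetrahedron(k: int, n: int) -> int:
--     if n == 1:
--         return 1
--     if n == 2:
--         return binomial_coefficient(k + 1, k)
--     tau = 0
--     for i in range(0, (k - 1) + 1):
--         tau += (binomial_coefficient(k + 1, k - i) *
--                 binomial_coefficient(n - 2, i))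
--     return tau
-- ===== SOURCE B (Python) =====
-- def _comb_mult(n: int, k: int) -> int:
--     """Binomial via the multiplicative (falling-factorial) formula, 0 outside 0 <= k <= n."""
--     if k < 0 or n < k:
--         return 0
--     kk = min(k, n - k)
--     r = 1
--     for j in range(1, kk + 1):
--         r = r * (n - kk + j) // j
--     return r
--
--
-- def helper_centered_hypertetrahedron(k: int, n: int) -> int:
--     # Vandermonde closed form: sum_{i=0}^{k-1} C(k+1, k-i) C(n-2, i) = C(n+k-1, k) - C(n-2, k)
--     if n == 1:
--         return 1
--     if n == 2:
--         return k + 1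
--     return _comb_mult(n + k - 1, k) - _comb_mult(n - 2, k)
-- ===== Notes on version B (the rewrite author's own statement) =====
-- stated objective: faster
-- what changed: Replaced the O(k)-term loop summing binomial products with the Vandermonde closed form C(n+k-1,k) - C(n-2,k), each binomial computed by a single multiplicative falling-factorial loop of min(k,n-k) steps.
import Mathlib
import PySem

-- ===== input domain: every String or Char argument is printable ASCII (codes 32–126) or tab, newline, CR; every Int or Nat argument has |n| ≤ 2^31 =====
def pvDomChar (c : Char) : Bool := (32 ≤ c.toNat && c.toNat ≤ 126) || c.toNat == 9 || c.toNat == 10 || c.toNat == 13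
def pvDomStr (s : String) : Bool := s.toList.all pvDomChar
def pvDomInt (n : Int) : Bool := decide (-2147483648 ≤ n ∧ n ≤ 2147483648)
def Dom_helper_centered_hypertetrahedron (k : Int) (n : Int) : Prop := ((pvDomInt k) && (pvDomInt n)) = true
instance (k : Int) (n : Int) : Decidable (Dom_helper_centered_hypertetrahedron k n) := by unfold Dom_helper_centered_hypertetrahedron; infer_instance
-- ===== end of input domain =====

-- B replaces A's O(k)-term loop of binomial products by the Vandermonde closed form
-- C(n+k-1,k) - C(n-2,k), each binomial computed by the multiplicative falling-factorial loop.


-- ===== PORT A =====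
-- math.comb(n, k): exact for 0 ≤ n and 0 ≤ k (returns 0 when k > n, like Python);
-- Python raises ValueError on a negative argument — those inputs are outside Pre_.
def binomial_coefficient (n : Int) (k : Int) : Int :=
  if 0 ≤ n ∧ 0 ≤ k then ((n.toNat.choose k.toNat : Nat) : Int) else 0

def helper_centered_hypertetrahedron (k : Int) (n : Int) : Int :=
  if n = 1 then 1
  else if n = 2 then binomial_coefficient (k + 1) k
  else
    (PySem.List.pyRange 0 ((k - 1) + 1) 1).foldl
      (fun tau i => tau + binomial_coefficient (k + 1) (k - i) * binomial_coefficient (n - 2) i) 0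

-- ===== PORT B =====
-- _comb_mult(n, k): multiplicative formula over min(k, n-k) exact-division steps; 0 outside 0 <= k <= n
def comb_mult (n : Int) (k : Int) : Int :=
  if k < 0 ∨ n < k then 0
  else
    let kk := min k (n - k)
    (PySem.List.pyRange 1 (kk + 1) 1).foldl
      (fun r j => PySem.Int.floordiv (r * (n - kk + j)) j) 1

def helper_centered_hypertetrahedron_alt (k : Int) (n : Int) : Int :=
  if n = 1 then 1
  else if n = 2 then k + 1
  else comb_mult (n + k - 1) k - comb_mult (n - 2) k

-- ===== PRECONDITION & SPEC =====
-- Pre_ excludes exactly the inputs where A raises ValueError (math.comb on a negative argument).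
def Pre_helper_centered_hypertetrahedron (k : Int) (n : Int) : Prop :=
  ¬ ((n = 2 ∧ k < 0) ∨ (1 ≤ k ∧ n ≤ 0))
instance (k : Int) (n : Int) : Decidable (Pre_helper_centered_hypertetrahedron k n) := by
  unfold Pre_helper_centered_hypertetrahedron; infer_instance

def pvWitness_helper_centered_hypertetrahedron : Int × Int := (3, 5)

def Spec_helper_centered_hypertetrahedron (k : Int) (n : Int) (out : Int) : Prop := out = helper_centered_hypertetrahedron_alt k n
instance (k : Int) (n : Int) (out : Int) : Decidable (Spec_helper_centered_hypertetrahedron k n out) := by unfold Spec_helper_centered_hypertetrahedron; infer_instance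

-- ===== CLAIM (what is proved, stated in full; the proofs are below) =====
def Claim_equal_helper_centered_hypertetrahedron : Prop := ∀ (k : Int) (n : Int), Dom_helper_centered_hypertetrahedron k n → Pre_helper_centered_hypertetrahedron k n → Spec_helper_centered_hypertetrahedron k n (helper_centered_hypertetrahedron k n)

-- ===== LEMMAS AND PROOFS =====

-- The multiplicative loop computes the binomial coefficient (0 outside 0 ≤ k ≤ n).
lemma comb_mult_loop (m kk : Nat) :
    (PySem.List.pyRange 1 ((kk : Int) + 1) 1).foldl
      (fun r j => PySem.Int.floordiv (r * ((m : Int) + j)) j) 1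
      = (((m + kk).choose kk : Nat) : Int) := by
  induction kk with
  | zero => simp [PySem.List.pyRange_one_eq_nil]
  | succ K ih =>
    rw [show (((K + 1 : Nat) : Int) + 1) = ((K : Int) + 1) + 1 by push_cast; ring,
      PySem.List.pyRange_one_succ_right (by omega), List.foldl_append]
    simp only [List.foldl, ih]
    have hnat : (m + K).choose K * (m + (K + 1)) = (m + K + 1).choose (K + 1) * (K + 1) := by
      rw [show m + (K + 1) = (m + K) + 1 by omega, Nat.mul_comm]
      simpa [Nat.succ_eq_add_one] using Nat.add_one_mul_choose_eq (m + K) K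
    have key : ((m + K).choose K : Int) * ((m : Int) + ((K : Int) + 1))
        = ((m + K + 1).choose (K + 1) : Int) * ((K : Int) + 1) := by
      exact_mod_cast congrArg (Nat.cast : ℕ → ℤ) hnat
    rw [PySem.Int.floordiv_eq_ediv_of_pos (by omega), key,
      Int.mul_ediv_cancel _ (by omega), show m + K + 1 = m + (K + 1) by omega]

lemma comb_mult_eq_choose (n k : Int) :
    comb_mult n k = if 0 ≤ k ∧ k ≤ n then ((n.toNat.choose k.toNat : Nat) : Int) else 0 := by
  unfold comb_mult
  by_cases h : k < 0 ∨ n < k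
  · rw [if_pos h, if_neg (by omega)]
  · rw [if_neg h, if_pos (by omega)]
    show (PySem.List.pyRange 1 (min k (n - k) + 1) 1).foldl
        (fun r j => PySem.Int.floordiv (r * (n - min k (n - k) + j)) j) 1
        = ((n.toNat.choose k.toNat : Nat) : Int)
    have e1 : min k (n - k) = (((min k (n - k)).toNat : Nat) : Int) := by omega
    conv_lhs => rw [e1]
    rw [show n - (((min k (n - k)).toNat : Nat) : Int)
        = (((n - min k (n - k)).toNat : Nat) : Int) by omega]
    rw [comb_mult_loop (n - min k (n - k)).toNat (min k (n - k)).toNat]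
    have hsum : (n - min k (n - k)).toNat + (min k (n - k)).toNat = n.toNat := by omega
    rw [hsum]
    by_cases hmin : k ≤ n - k
    · rw [show (min k (n - k)).toNat = k.toNat by omega]
    · rw [show (min k (n - k)).toNat = n.toNat - k.toNat by omega,
        Nat.choose_symm (by omega)]

-- Vandermonde, shifted: the tail j = 1..K of ∑_j C(a,j) C(p,K-j) = C(a+p,K), reindexed by i = K - j.
lemma vdm_shift (a p K : ℕ) :
    (∑ i ∈ Finset.range K, a.choose (K - i) * p.choose i) + p.choose K = (a + p).choose K := by
  rw [Nat.add_choose_eq, Finset.Nat.sum_antidiagonal_eq_sum_range_succ_mk,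
    Finset.sum_range_succ' (fun j => a.choose j * p.choose (K - j)) K]
  simp only [Nat.choose_zero_right, one_mul]
  congr 1
  rw [← Finset.sum_range_reflect (fun j => a.choose (j + 1) * p.choose (K - (j + 1))) K]
  refine Finset.sum_congr rfl fun i hi => ?_
  have hiK : i < K := Finset.mem_range.mp hi
  have h1 : K - 1 - i + 1 = K - i := by omega
  have h2 : K - (K - i) = i := by omega
  simp only [h1, h2]

lemma list_sum_range_eq (f : ℕ → ℤ) (n : ℕ) :
    ((List.range n).map f).sum = ∑ i ∈ Finset.range n, f i := rfl

-- The loop of A, as a sum over List.range k.toNat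
lemma loopA_eq (k n : Int) (hk : 1 ≤ k) (hn : 3 ≤ n) :
    helper_centered_hypertetrahedron k n =
      ∑ i ∈ Finset.range k.toNat,
        ((k.toNat + 1).choose (k.toNat - i) * (n - 2).toNat.choose i : ℤ) := by
  have hn1 : n ≠ 1 := by omega
  have hn2 : n ≠ 2 := by omega
  simp only [helper_centered_hypertetrahedron, hn1, hn2, if_false]
  rw [show (k - 1) + 1 = k by ring, PySem.List.foldl_add, PySem.List.pyRange_one,
    List.map_map, zero_add, show k - 0 = k by ring, list_sum_range_eq]
  refine Finset.sum_congr rfl fun i hi => ?_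
  have hiK : i < k.toNat := Finset.mem_range.mp hi
  simp only [Function.comp, zero_add]
  have e1 : binomial_coefficient (k + 1) (k - (i : ℤ))
      = (((k.toNat + 1).choose (k.toNat - i) : ℕ) : ℤ) := by
    unfold binomial_coefficient
    rw [if_pos ⟨by omega, by omega⟩]
    have ha : (k + 1).toNat = k.toNat + 1 := by omega
    have hb : (k - (i : ℤ)).toNat = k.toNat - i := by omega
    rw [ha, hb]
  have e2 : binomial_coefficient (n - 2) (i : ℤ)
      = (((n - 2).toNat.choose i : ℕ) : ℤ) := by
    unfold binomial_coefficient
    rw [if_pos ⟨by omega, by omega⟩, Int.toNat_natCast]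
  rw [e1, e2]

theorem helper_centered_hypertetrahedron_spec : Claim_equal_helper_centered_hypertetrahedron := by
  intro k n _ hpre
  unfold Spec_helper_centered_hypertetrahedron helper_centered_hypertetrahedron_alt
  by_cases hn1 : n = 1
  · simp [helper_centered_hypertetrahedron, hn1]
  by_cases hn2 : n = 2
  · -- n = 2, k ≥ 0: comb(k+1, k) = k + 1
    have hk : 0 ≤ k := by
      unfold Pre_helper_centered_hypertetrahedron at hpre; omega
    subst hn2
    simp only [helper_centered_hypertetrahedron, binomial_coefficient]
    norm_num
    rw [if_pos ⟨by omega, hk⟩]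
    have ha : (k + 1).toNat = k.toNat + 1 := by omega
    rw [ha, Nat.choose_succ_self_right]
    omega
  · simp only [hn1, hn2, if_false]
    rw [comb_mult_eq_choose, comb_mult_eq_choose]
    by_cases hk : 1 ≤ k
    · -- main case: k ≥ 1, and by Pre_ n ≥ 3 (n ∉ {1,2}, n ≥ 1)
      have hn3 : 3 ≤ n := by
        unfold Pre_helper_centered_hypertetrahedron at hpre; omega
      rw [loopA_eq k n hk hn3]
      set K := k.toNat with hK
      set p := (n - 2).toNat with hp
      have hc1 : (if 0 ≤ k ∧ k ≤ n + k - 1 then (((n + k - 1).toNat.choose k.toNat : Nat) : Int) else 0)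
          = ((K + 1 + p).choose K : ℤ) := by
        rw [if_pos ⟨by omega, by omega⟩]
        congr 2
        omega
      have hc2 : (if 0 ≤ k ∧ k ≤ n - 2 then (((n - 2).toNat.choose k.toNat : Nat) : Int) else 0)
          = (p.choose K : ℤ) := by
        by_cases h : k ≤ n - 2
        · rw [if_pos ⟨by omega, h⟩]
        · rw [if_neg (by omega)]
          have hlt : p < K := by omega
          rw [Nat.choose_eq_zero_of_lt hlt]
          simp
      rw [hc1, hc2]
      have hv := vdm_shift (K + 1) p K
      have hcast : ((∑ i ∈ Finset.range K, (K + 1).choose (K - i) * p.choose i) + p.choose K : ℤ)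
          = ((K + 1 + p).choose K : ℤ) := by exact_mod_cast congrArg (Nat.cast : ℕ → ℤ) hv
      push_cast at hcast ⊢
      linarith
    · -- k ≤ 0: A's loop is empty (0); B's two binomials cancel (or both vanish)
      have hk0 : k ≤ 0 := by omega
      have hA : helper_centered_hypertetrahedron k n = 0 := by
        simp only [helper_centered_hypertetrahedron, hn1, hn2, if_false]
        rw [show (k - 1) + 1 = k by ring, PySem.List.pyRange_one]
        have hkt : (k - 0).toNat = 0 := by omega
        rw [hkt]
        rfl
      rw [hA]
      split_ifs with h1 h2 h2 <;>
        [skip; skip; skip; rfl] <;>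
      · have hk' : k = 0 := by omega
        subst hk'
        simp only [Int.toNat_zero, Nat.choose_zero_right] at *
        omega
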